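-- pv_equiv track=rewrite | github.com/UngemachM/ProgrammingMoritzUngemach | mustergenerator.py | letzte_zahl_im_muster
-- ===== SOURCE A (Python) =====
-- def letzte_zahl_im_muster(anzahl):
--     result = []
--     current = 0
--
--     for i in range(anzahl):
--         result.append(current)
--         current += 1
--
--         if i % 2 == 1:
--             current = result[i // 2] + 1
--
--     return result[-1] if result else None
-- ===== SOURCE B (Python) =====
-- def letzte_zahl_im_muster(anzahl):
--     # O(log n): instead of building the whole pattern, follow the halving
--     # recurrence a[j] = a[j-1] + 1 (j odd), a[j//2 - 1] + 1 (j even, j > 0)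
--     # backwards from the last index, counting the steps to index 0.
--     if anzahl <= 0:
--         return None
--     j = anzahl - 1
--     c = 0
--     while j > 0:
--         c += 1
--         j = j - 1 if j % 2 == 1 else j // 2 - 1
--     return c
-- ===== Notes on version B (the rewrite author's own statement) =====
-- stated objective: faster
-- what changed: Instead of materialising the whole pattern list and returning its last element, B follows the halving recurrence a[j]=a[j-1]+1 (j odd) / a[j//2-1]+1 (j even) backwards from the last index, counting steps to index 0.
import Mathlib
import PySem

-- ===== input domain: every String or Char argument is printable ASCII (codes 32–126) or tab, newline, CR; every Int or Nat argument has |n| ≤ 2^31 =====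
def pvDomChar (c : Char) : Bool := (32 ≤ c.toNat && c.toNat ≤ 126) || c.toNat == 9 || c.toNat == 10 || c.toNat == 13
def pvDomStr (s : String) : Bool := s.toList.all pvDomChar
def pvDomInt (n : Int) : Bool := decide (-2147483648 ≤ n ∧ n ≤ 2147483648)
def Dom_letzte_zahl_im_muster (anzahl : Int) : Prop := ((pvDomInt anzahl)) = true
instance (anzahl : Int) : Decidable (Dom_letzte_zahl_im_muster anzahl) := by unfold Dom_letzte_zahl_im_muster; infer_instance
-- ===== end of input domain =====

-- B replaces A's O(n) construction of the whole pattern list by an O(log n)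
-- walk of the halving recurrence from the last index down to 0.

-- ===== PORT A =====
-- one loop iteration: state is (result, current)
def pvStepA (s : List Int × Int) (i : Int) : List Int × Int :=
  let result := s.1 ++ [s.2]
  let current := s.2 + 1
  let current :=
    if PySem.Int.mod i 2 == 1 then
      -- result[i // 2] is always in range here, so the default is never used
      PySem.List.pyGetD result (PySem.Int.floordiv i 2) 0 + 1
    else current
  (result, current)

def letzte_zahl_im_muster (anzahl : Int) : Option Int :=
  let st := (PySem.List.pyRange 0 anzahl 1).foldl pvStepA ([], 0)
  -- result[-1] if result else None: pyGet? gives none exactly on the empty list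
  PySem.List.pyGet? st.1 (-1)

-- ===== PORT B =====
-- B's while loop: j walks down to 0, c counts the steps
def pvWalkB : Nat → Int → Int
  | 0, c => c
  | j+1, c =>
    if (j+1) % 2 = 1 then pvWalkB j (c+1)
    else pvWalkB ((j+1)/2 - 1) (c+1)
decreasing_by all_goals omega

def letzte_zahl_im_muster_alt (anzahl : Int) : Option Int :=
  if anzahl ≤ 0 then none
  else some (pvWalkB (anzahl - 1).toNat 0)

-- ===== PRECONDITION & SPEC =====
def Spec_letzte_zahl_im_muster (anzahl : Int) (out : Option Int) : Prop := out = letzte_zahl_im_muster_alt anzahl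
instance (anzahl : Int) (out : Option Int) : Decidable (Spec_letzte_zahl_im_muster anzahl out) := by unfold Spec_letzte_zahl_im_muster; infer_instance

-- ===== CLAIM (what is proved, stated in full; the proofs are below) =====
def Claim_equal_letzte_zahl_im_muster : Prop := ∀ (anzahl : Int), Dom_letzte_zahl_im_muster anzahl → Spec_letzte_zahl_im_muster anzahl (letzte_zahl_im_muster anzahl)

-- ===== LEMMAS AND PROOFS =====

-- the pattern value at index j
def pvA (j : Nat) : Int := pvWalkB j 0

theorem pvWalkB_shift (j : Nat) : ∀ c, pvWalkB j c = c + pvWalkB j 0 := by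
  induction j using Nat.strong_induction_on with
  | _ j ih =>
    intro c
    match j with
    | 0 => simp [pvWalkB]
    | j+1 =>
      rw [pvWalkB, pvWalkB]
      split
      · rw [ih j (by omega), ih j (by omega) (0+1)]; ring
      · rw [ih ((j+1)/2 - 1) (by omega), ih ((j+1)/2 - 1) (by omega) (0+1)]; ring

theorem pvA_succ_odd (j : Nat) (h : (j+1) % 2 = 1) : pvA (j+1) = pvA j + 1 := by
  unfold pvA; rw [pvWalkB, if_pos h, pvWalkB_shift]; ring

theorem pvA_succ_even (j : Nat) (h : (j+1) % 2 ≠ 1) : pvA (j+1) = pvA ((j+1)/2 - 1) + 1 := by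
  unfold pvA; rw [pvWalkB, if_neg h, pvWalkB_shift]; ring

-- loop invariant of A: after n iterations the list holds pvA 0 .. pvA (n-1)
-- and current = pvA n
theorem foldA_inv (n : Nat) :
    (PySem.List.pyRange 0 (n : Int) 1).foldl pvStepA ([], 0)
      = ((List.range n).map pvA, pvA n) := by
  induction n with
  | zero => simp [PySem.List.pyRange_one_eq_nil, pvA, pvWalkB]
  | succ n ih =>
    have h : PySem.List.pyRange 0 ((n : Int) + 1) 1
        = PySem.List.pyRange 0 (n : Int) 1 ++ [(n : Int)] :=
      PySem.List.pyRange_one_succ_right (by omega)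
    push_cast
    rw [h, List.foldl_append, ih]
    simp only [List.foldl_cons, List.foldl_nil]
    unfold pvStepA
    have hmod : PySem.Int.mod (n : Int) 2 = ((n % 2 : Nat) : Int) := by
      exact_mod_cast PySem.Int.mod_natCast n 2
    have hdiv : PySem.Int.floordiv (n : Int) 2 = ((n / 2 : Nat) : Int) := by
      exact_mod_cast PySem.Int.floordiv_natCast n 2
    have hres : (List.range n).map pvA ++ [pvA n] = (List.range (n+1)).map pvA := by
      rw [List.range_succ, List.map_append]; rfl
    by_cases hpar : n % 2 = 1
    · have hget : PySem.List.pyGetD ((List.range (n+1)).map pvA) ((n / 2 : Nat) : Int) 0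
          = pvA (n / 2) := by
        rw [PySem.List.pyGetD_natCast]
        rw [List.getD_eq_getElem?_getD]
        simp [List.getElem?_map, List.getElem?_range (show n / 2 < n + 1 by omega)]
      simp only [hmod, hdiv, hpar, hres, hget]
      have : pvA (n+1) = pvA (n / 2) + 1 := by
        rw [pvA_succ_even n (by omega)]
        congr 2
        omega
      simp [this]
    · have h0 : n % 2 = 0 := by omega
      have hA : pvA (n+1) = pvA n + 1 := pvA_succ_odd n (by omega)
      simp only [hmod, hdiv, h0, hres]
      norm_num [hA]

-- ===== VERDICT (by name: the statement is the Claim_ definition above) =====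
theorem letzte_zahl_im_muster_spec : Claim_equal_letzte_zahl_im_muster := by
  intro anzahl _
  unfold Spec_letzte_zahl_im_muster letzte_zahl_im_muster letzte_zahl_im_muster_alt
  by_cases hle : anzahl ≤ 0
  · rw [PySem.List.pyRange_one_eq_nil hle]
    simp [hle, PySem.List.pyGet?]
  · have hn : anzahl = ((anzahl.toNat : Nat) : Int) := by omega
    obtain ⟨n, hn1⟩ : ∃ n : Nat, anzahl = ((n+1 : Nat) : Int) :=
      ⟨anzahl.toNat - 1, by omega⟩
    rw [hn1, foldA_inv]
    simp only [List.range_succ, List.map_append, List.map_cons, List.map_nil]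
    rw [PySem.List.pyGet?_neg_one_append_singleton]
    have : ((((n:Nat)+1 : Nat) : Int) - 1).toNat = n := by omega
    rw [if_neg (by omega), this]
    rfl
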